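-- pv_equiv track=rewrite | github.com/SRAS2024/IBM-Final | emotion_app/detector.py | _split_sentences_from_tokens
-- ===== SOURCE A (Python) =====
-- from typing import Any, Dict, Iterable, List, Tuple, Optional
--
-- _SENT_ENDERS = {".", "!", "?", "?!", "!?","\n"}
--
-- def _split_sentences_from_tokens(tokens: List[str], max_sentences: int = 12) -> List[List[str]]:
--     """Split tokens into sentences. Cap at 12; merge overflow into the last sentence."""
--     if not tokens:
--         return [[]]
--     sents: List[List[str]] = []
--     current: List[str] = []
--     for i, t in enumerate(tokens):
--         current.append(t)
--         if t in _SENT_ENDERS or (t == ";" and len(current) >= 6):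
--             sents.append(current)
--             current = []
--     if current:
--         sents.append(current)
--     if not sents:
--         sents = [tokens[:]]
--
--     if len(sents) <= max_sentences:
--         return sents
--
--     # Merge any overflow into the twelfth sentence to preserve information
--     keep = sents[:max_sentences]
--     overflow: List[str] = []
--     for s in sents[max_sentences:]:
--         overflow.extend(s)
--     keep[-1].extend(overflow)
--     return keep
-- ===== SOURCE B (Python) =====
-- _SENT_ENDERS = {".", "!", "?", "?!", "!?", "\n"}
--
--
-- def _split_sentences_from_tokens(tokens, max_sentences=12):
--     """Two-phase rewrite: record cut indices in one scan, slice at them, then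
--     fold any overflow past the cap into one final merged sentence."""
--     if not tokens:
--         return [[]]
--     cuts = []
--     run = 0
--     for i, t in enumerate(tokens):
--         run += 1
--         if t in _SENT_ENDERS or (t == ";" and run >= 6):
--             cuts.append(i + 1)
--             run = 0
--     if not cuts or cuts[-1] < len(tokens):
--         cuts.append(len(tokens))
--     sents = [tokens[a:b] for a, b in zip([0] + cuts, cuts)]
--     if len(sents) <= max_sentences:
--         return sents
--     head = sents[:max_sentences - 1]
--     tail = [tok for s in sents[max_sentences - 1:] for tok in s]
--     return head + [tail]
-- ===== Notes on version B (the rewrite author's own statement) =====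
-- stated objective: alternative
-- what changed: Replaces A's single accumulate-current-sentence loop with a two-phase decomposition: one scan records cut indices (with a tokens-since-last-cut counter for the semicolon rule), then the token list is sliced at those cuts, and overflow past the cap is merged by flattening the tail sentences into one list instead of extending the kept last sentence.
-- outside the precondition, e.g. on _split_sentences_from_tokens(['a'], 0): A raises IndexError, B returns [['a']]; on _split_sentences_from_tokens(['a', '.', 'b'], -1): A returns [['a', '.', 'b']], B returns [['a', '.', 'b']]
import Mathlib
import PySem

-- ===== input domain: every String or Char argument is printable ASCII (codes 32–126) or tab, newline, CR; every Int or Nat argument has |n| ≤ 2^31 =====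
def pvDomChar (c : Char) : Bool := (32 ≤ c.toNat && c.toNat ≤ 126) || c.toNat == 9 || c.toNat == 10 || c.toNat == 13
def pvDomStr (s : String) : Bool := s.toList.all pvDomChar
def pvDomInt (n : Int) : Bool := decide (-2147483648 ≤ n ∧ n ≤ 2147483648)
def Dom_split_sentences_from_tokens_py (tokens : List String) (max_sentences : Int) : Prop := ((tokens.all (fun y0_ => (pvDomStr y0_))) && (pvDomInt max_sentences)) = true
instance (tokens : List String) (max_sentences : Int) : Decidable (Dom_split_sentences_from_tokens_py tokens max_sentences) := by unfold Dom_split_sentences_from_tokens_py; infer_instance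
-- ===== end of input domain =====

-- B replaces A's accumulate-current-sentence loop with a two-phase decomposition (record cut
-- indices, then slice and merge overflow by flattening); objective: alternative, same O(n) cost.


-- ===== PORT A =====
def pvSentEnders : List String := [".", "!", "?", "?!", "!?", "\n"]

-- A's for-loop over tokens: state (sents, current)
def pvLoopA : List String → List (List String) → List String → List (List String) × List String
  | [], sents, cur => (sents, cur)
  | t :: ts, sents, cur =>
    let cur' := cur ++ [t]
    if t ∈ pvSentEnders ∨ (t = ";" ∧ 6 ≤ cur'.length) then pvLoopA ts (sents ++ [cur']) []
    else pvLoopA ts sents cur'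

def split_sentences_from_tokens_py (tokens : List String) (max_sentences : Int) : List (List String) :=
  if tokens = [] then [[]]
  else
    let res := pvLoopA tokens [] []
    let sents := if res.2 ≠ [] then res.1 ++ [res.2] else res.1
    let sents := if sents = [] then [tokens] else sents
    if (sents.length : Int) ≤ max_sentences then sents
    else
      let keep := PySem.List.slice sents none (some max_sentences)
      let overflow := (PySem.List.slice sents (some max_sentences) none).foldl (fun acc s => acc ++ s) []
      match keep.getLast? with
      | none => []  -- keep is empty: Python raises IndexError at keep[-1]; excluded by Pre_
      | some last => keep.dropLast ++ [last ++ overflow]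

-- ===== PORT B =====
-- B's first scan: state (cuts, run); i is the enumerate index
def pvLoopB : List String → Int → List Int → Nat → List Int × Nat
  | [], _, cuts, run => (cuts, run)
  | t :: ts, i, cuts, run =>
    let run' := run + 1
    if t ∈ pvSentEnders ∨ (t = ";" ∧ 6 ≤ run') then pvLoopB ts (i + 1) (cuts ++ [i + 1]) 0
    else pvLoopB ts (i + 1) cuts run'

def split_sentences_from_tokens_py_alt (tokens : List String) (max_sentences : Int) : List (List String) :=
  if tokens = [] then [[]]
  else
    let cuts0 := (pvLoopB tokens 0 [] 0).1
    let cuts := if cuts0 = [] ∨ cuts0.getLast?.getD 0 < (tokens.length : Int)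
                then cuts0 ++ [(tokens.length : Int)] else cuts0
    let sents := (List.zip ((0 : Int) :: cuts) cuts).map
                  (fun ab => PySem.List.slice tokens (some ab.1) (some ab.2))
    if (sents.length : Int) ≤ max_sentences then sents
    else
      let head := PySem.List.slice sents none (some (max_sentences - 1))
      let tail := (PySem.List.slice sents (some (max_sentences - 1)) none).flatMap (fun s => s)
      head ++ [tail]

-- ===== PRECONDITION & SPEC =====
-- Pre_ restricts to the natural domain of the cap: for non-positive max_sentences with nonempty
-- tokens A raises IndexError at keep[-1] whenever the sentence count is at most -max_sentences,
-- and where the accidental negative-slice arithmetic does return, its value coincides with B's.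
def Pre_split_sentences_from_tokens_py (tokens : List String) (max_sentences : Int) : Prop :=
  tokens = [] ∨ 1 ≤ max_sentences
instance (tokens : List String) (max_sentences : Int) : Decidable (Pre_split_sentences_from_tokens_py tokens max_sentences) := by unfold Pre_split_sentences_from_tokens_py; infer_instance
def pvWitness_split_sentences_from_tokens_py : List String × Int := (["hello", ".", "bye"], 12)

def Spec_split_sentences_from_tokens_py (tokens : List String) (max_sentences : Int) (out : List (List String)) : Prop := out = split_sentences_from_tokens_py_alt tokens max_sentences
instance (tokens : List String) (max_sentences : Int) (out : List (List String)) : Decidable (Spec_split_sentences_from_tokens_py tokens max_sentences out) := by unfold Spec_split_sentences_from_tokens_py; infer_instance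

-- ===== CLAIM (what is proved, stated in full; the proofs are below) =====
def Claim_equal_split_sentences_from_tokens_py : Prop := ∀ (tokens : List String) (max_sentences : Int), Dom_split_sentences_from_tokens_py tokens max_sentences → Pre_split_sentences_from_tokens_py tokens max_sentences → Spec_split_sentences_from_tokens_py tokens max_sentences (split_sentences_from_tokens_py tokens max_sentences)

-- ===== LEMMAS AND PROOFS =====

-- Nat-level version of B's first scan (proof helper)
def pvNatLoopB : List String → Nat → List Nat → Nat → List Nat × Nat
  | [], _, cuts, run => (cuts, run)
  | t :: ts, i, cuts, run =>
    let run' := run + 1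
    if t ∈ pvSentEnders ∨ (t = ";" ∧ 6 ≤ run') then pvNatLoopB ts (i + 1) (cuts ++ [i + 1]) 0
    else pvNatLoopB ts (i + 1) cuts run'

-- the sentences obtained by slicing xs at the Nat cut positions cs
def pvZipSeg (xs : List String) (cs : List Nat) : List (List String) :=
  (List.zip (0 :: cs) cs).map (fun ab => (xs.drop ab.1).take (ab.2 - ab.1))

lemma pvLoopB_natCast : ∀ (ts : List String) (n : Nat) (cs : List Nat) (run : Nat),
    pvLoopB ts ((n : Nat) : Int) (cs.map (fun k : Nat => (k : Int))) run =
      ((pvNatLoopB ts n cs run).1.map (fun k : Nat => (k : Int)),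
        (pvNatLoopB ts n cs run).2) := by
  intro ts
  induction ts with
  | nil => intro n cs run; rfl
  | cons t ts ih =>
    intro n cs run
    simp only [pvLoopB, pvNatLoopB]
    have h1 : ((n : Nat) : Int) + 1 = (((n + 1 : Nat)) : Int) := by push_cast; ring
    have h2 : cs.map (fun k : Nat => (k : Int)) ++ [(((n + 1 : Nat)) : Int)] =
        (cs ++ [n + 1]).map (fun k : Nat => (k : Int)) := by simp
    split
    · rw [h1, h2, ih]
    · rw [h1, ih]

lemma pvZip_snoc {α : Type} : ∀ (a : α) (cs : List α) (n : α),
    List.zip (a :: (cs ++ [n])) (cs ++ [n]) =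
      List.zip (a :: cs) cs ++ [(cs.getLastD a, n)] := by
  intro a cs
  induction cs generalizing a with
  | nil => intro n; rfl
  | cons c cs ih =>
    intro n
    simp only [List.cons_append, List.zip_cons_cons, ih c n, List.getLastD_cons]

lemma pvZipSeg_snoc (xs : List String) (cs : List Nat) (n : Nat) :
    pvZipSeg xs (cs ++ [n]) =
      pvZipSeg xs cs ++ [(xs.drop (cs.getLastD 0)).take (n - cs.getLastD 0)] := by
  unfold pvZipSeg
  rw [pvZip_snoc]
  simp

lemma pvLength_zipSeg (xs : List String) (cs : List Nat) :
    (pvZipSeg xs cs).length = cs.length := by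
  unfold pvZipSeg
  simp [List.length_zip]

-- the core invariant: A's loop produces exactly the slices of the token list at B's cut
-- positions, plus the tail after the last cut
lemma pvCore : ∀ (ts base cur : List String) (cs : List Nat) (i run : Nat),
    i = base.length + cur.length → run = cur.length → cs.getLastD 0 = base.length →
    pvLoopA ts (pvZipSeg (base ++ cur ++ ts) cs) cur =
      (pvZipSeg (base ++ cur ++ ts) (pvNatLoopB ts i cs run).1,
        (base ++ cur ++ ts).drop ((pvNatLoopB ts i cs run).1.getLastD 0)) ∧
    (pvNatLoopB ts i cs run).1.getLastD 0 ≤ (base ++ cur ++ ts).length := by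
  intro ts
  induction ts with
  | nil =>
    intro base cur cs i run hi hrun hlast
    simp only [pvLoopA, pvNatLoopB, List.append_nil]
    rw [hlast]
    constructor
    · congr 1
      exact List.drop_left.symm
    · simp
  | cons t ts ih =>
    intro base cur cs i run hi hrun hlast
    simp only [pvLoopA, pvNatLoopB]
    by_cases hc : t ∈ pvSentEnders ∨ (t = ";" ∧ 6 ≤ (cur ++ [t]).length)
    · have hc' : t ∈ pvSentEnders ∨ (t = ";" ∧ 6 ≤ run + 1) := by
        simpa [hrun] using hc
      rw [if_pos hc, if_pos hc']
      have hsnoc : pvZipSeg (base ++ cur ++ t :: ts) cs ++ [cur ++ [t]] =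
          pvZipSeg (base ++ cur ++ t :: ts) (cs ++ [i + 1]) := by
        rw [pvZipSeg_snoc, hlast]
        congr 2
        have hd : (base ++ cur ++ t :: ts).drop base.length = (cur ++ [t]) ++ ts := by
          rw [show base ++ cur ++ t :: ts = base ++ ((cur ++ [t]) ++ ts) by simp,
            List.drop_left]
        rw [hd, show i + 1 - base.length = (cur ++ [t]).length by simp; omega,
          List.take_left]
      rw [hsnoc, show base ++ cur ++ t :: ts = (base ++ (cur ++ [t])) ++ [] ++ ts by simp]
      exact ih (base ++ (cur ++ [t])) [] (cs ++ [i + 1]) (i + 1) 0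
        (by simp; omega) rfl (by rw [List.getLastD_concat]; simp; omega)
    · have hc' : ¬ (t ∈ pvSentEnders ∨ (t = ";" ∧ 6 ≤ run + 1)) := by
        simpa [hrun] using hc
      rw [if_neg hc, if_neg hc']
      rw [show base ++ cur ++ t :: ts = base ++ (cur ++ [t]) ++ ts by simp]
      exact ih base (cur ++ [t]) cs (i + 1) (run + 1)
        (by simp; omega) (by simp; omega) hlast

-- B's Int-level slicing of the token list equals pvZipSeg at the Nat cut positions
lemma pvSentsInt (tokens : List String) (cs : List Nat) :
    (List.zip ((0 : Int) :: cs.map (fun k : Nat => (k : Int)))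
        (cs.map (fun k : Nat => (k : Int)))).map
        (fun ab => PySem.List.slice tokens (some ab.1) (some ab.2)) =
      pvZipSeg tokens cs := by
  unfold pvZipSeg
  rw [show ((0 : Int) :: cs.map (fun k : Nat => (k : Int))) =
      (0 :: cs).map (fun k : Nat => (k : Int)) by simp,
    List.zip_map, List.map_map]
  apply List.map_congr_left
  intro ab _
  simp [PySem.List.slice_natCast]

lemma pvGetLastD_map_cast : ∀ (cs : List Nat) (d : Nat),
    (cs.map (fun k : Nat => (k : Int))).getLastD ((d : Nat) : Int) =
      ((cs.getLastD d : Nat) : Int) := by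
  intro cs
  induction cs with
  | nil => intro d; rfl
  | cons c cs ih => intro d; simp only [List.map_cons, List.getLastD_cons, ih]

-- A's overflow loop is a flatten
lemma pvFoldl_append_flatten (l : List (List String)) (init : List String) :
    l.foldl (fun acc s => acc ++ s) init = init ++ l.flatten := by
  induction l generalizing init with
  | nil => simp
  | cons x xs ih => simp [List.foldl_cons, ih, List.append_assoc]

-- the common merge step: the two programs' overflow handling agrees when 1 ≤ m < |S|
lemma pvMerge (S : List (List String)) (m : Int) (hm : 1 ≤ m) (hgt : ¬ (S.length : Int) ≤ m) :
    (match (PySem.List.slice S none (some m)).getLast? with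
      | none => ([] : List (List String))
      | some last =>
          (PySem.List.slice S none (some m)).dropLast ++
            [last ++ (PySem.List.slice S (some m) none).foldl (fun acc s => acc ++ s) []]) =
      PySem.List.slice S none (some (m - 1)) ++
        [(PySem.List.slice S (some (m - 1)) none).flatMap (fun s => s)] := by
  have hk1 : 1 ≤ m.toNat := by omega
  have hkS : m.toNat < S.length := by omega
  have hm1 : (m - 1).toNat = m.toNat - 1 := by omega
  rw [PySem.List.slice_to S (by omega : (0:Int) ≤ m),
    PySem.List.slice_from S (by omega : (0:Int) ≤ m),
    PySem.List.slice_to S (by omega : (0:Int) ≤ m - 1),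
    PySem.List.slice_from S (by omega : (0:Int) ≤ m - 1), hm1]
  have htl : (S.take m.toNat).length = m.toNat := by
    rw [List.length_take]; omega
  have hlast : (S.take m.toNat).getLast? = some (S[m.toNat - 1]'(by omega)) := by
    rw [List.getLast?_eq_getElem?, htl, List.getElem?_take, if_pos (by omega),
      List.getElem?_eq_getElem (by omega)]
  rw [hlast]
  have hdl : (S.take m.toNat).dropLast = S.take (m.toNat - 1) := by
    rw [List.dropLast_eq_take, htl, List.take_take, min_eq_left (by omega)]
  rw [hdl, pvFoldl_append_flatten, List.nil_append]
  rw [show (fun s : List String => s) = @id (List String) from rfl, List.flatMap_id,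
    List.drop_eq_getElem_cons (show m.toNat - 1 < S.length by omega),
    show m.toNat - 1 + 1 = m.toNat by omega, List.flatten_cons]

-- ===== VERDICT (by name: the statement is the Claim_ definition above) =====
theorem split_sentences_from_tokens_py_spec : Claim_equal_split_sentences_from_tokens_py := by
  unfold Claim_equal_split_sentences_from_tokens_py
  intro tokens m _ hpre
  unfold Spec_split_sentences_from_tokens_py
  unfold split_sentences_from_tokens_py split_sentences_from_tokens_py_alt
  by_cases h0 : tokens = []
  · simp [h0]
  · rw [if_neg h0, if_neg h0]
    have hm : 1 ≤ m := hpre.resolve_left h0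
    have htok : 1 ≤ tokens.length := by
      cases tokens with
      | nil => exact absurd rfl h0
      | cons a l => simp
    obtain ⟨hA, hle⟩ := pvCore tokens [] [] [] 0 0 rfl rfl rfl
    simp only [List.nil_append] at hA hle
    rw [show pvZipSeg tokens [] = [] from rfl] at hA
    have hB0 : pvLoopB tokens 0 [] 0 =
        ((pvNatLoopB tokens 0 [] 0).1.map (fun k : Nat => (k : Int)),
          (pvNatLoopB tokens 0 [] 0).2) := by
      have h := pvLoopB_natCast tokens 0 [] 0
      simpa using h
    set F : List Nat := (pvNatLoopB tokens 0 [] 0).1 with hF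
    set L : Nat := F.getLastD 0 with hL
    have hget : (F.map (fun k : Nat => (k : Int))).getLast?.getD 0 = ((L : Nat) : Int) := by
      rw [← List.getLastD_eq_getLast?, ← Nat.cast_zero, pvGetLastD_map_cast]
    simp only [hB0, hA, hget]
    by_cases hdrop : L < tokens.length
    · have hrest : tokens.drop L ≠ [] := by
        rw [Ne, List.drop_eq_nil_iff]; omega
      rw [if_pos hrest,
        if_pos (Or.inr (by exact_mod_cast hdrop : ((L : Nat) : Int) < (tokens.length : Int)))]
      have hcuts : F.map (fun k : Nat => (k : Int)) ++ [(tokens.length : Int)] =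
          (F ++ [tokens.length]).map (fun k : Nat => (k : Int)) := by simp
      rw [hcuts, pvSentsInt, pvZipSeg_snoc, ← hL]
      have hfull : (tokens.drop L).take (tokens.length - L) = tokens.drop L :=
        List.take_of_length_le (by rw [List.length_drop])
      rw [hfull]
      rw [if_neg (by simp : ¬ pvZipSeg tokens F ++ [tokens.drop L] = [])]
      split
      · rfl
      · exact pvMerge _ m hm (by assumption)
    · have hLeq : L = tokens.length := by omega
      have hrest : ¬ tokens.drop L ≠ [] := by
        rw [hLeq]; simp
      have hFne : F ≠ [] := by
        intro h
        rw [h] at hL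
        simp at hL
        omega
      rw [if_neg hrest,
        if_neg (show ¬ (F.map (fun k : Nat => (k : Int)) = [] ∨
            ((L : Nat) : Int) < (tokens.length : Int)) by
          rw [not_or]
          constructor
          · simpa [List.map_eq_nil_iff] using hFne
          · rw [hLeq]
            exact lt_irrefl _),
        pvSentsInt]
      have hSne : ¬ pvZipSeg tokens F = [] := by
        rw [← Ne, ← List.length_pos_iff, pvLength_zipSeg]
        exact List.length_pos_iff.mpr hFne
      rw [if_neg hSne]
      split
      · rfl
      · exact pvMerge _ m hm (by assumption)
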